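-- pv_equiv track=rewrite | github.com/MinHoon-LEE/Ps_Sql | Programmers/Algorithm/Python/60059/60059.py | solution
-- ===== SOURCE A (Python) =====
-- def solution(key, lock):
--     answer = False
--
--     #Lock 부분 홈/돌기 반전
--     check = 0
--     for i in range (len(lock)):
--         for j in range(len(lock)):
--             if lock[i][j] == 0:
--                 lock[i][j] = 1
--                 check = 1
--             else:
--                 lock[i][j] = 0
--     if check == 0:
--         return True
--     # 회전 x
--     if find(key,lock) == True:
--         return True
--     # 90도 회전
--     key = rotate_90(key)
--     if find(key,lock) == True:
--         return True
--     # 180도 회전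
--     key = rotate_90(key)
--     if find(key,lock) == True:
--         return True
--     # 270도 회전
--     key = rotate_90(key)
--     if find(key,lock) == True:
--         return True
--
--     return answer
--
-- def rotate_90(arr):
--     tmp = [[0] * len(arr) for i in range (len(arr))]
--     for i in range (len(arr)):
--         for j in range (len(arr)):
--             tmp[j][len(arr) - 1 - i] = arr[i][j]
--     return tmp
--
-- def find(key, lock):
--     length = len(lock)
--     for i in range (len(lock)):
--         for j in range (len(lock)):
--             if move_arr(key, i, j,length) == lock:
--                 return True
--             if move_arr(key, -i, j,length) == lock:
--                 return True
--             if move_arr(key, i, -j,length) == lock: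
--                 return True
--             if move_arr(key, -i, -j,length) == lock:
--                 return True
--     return False
--
-- def move_arr(arr, i ,j,length):
--     tmp =  [[0] * length for r in range (length)]
--     for a in range (len(arr)):
--         for b in range (len(arr)):
--             if a + i < length and a + i >= 0:
--                 if b + j < length and b + j >= 0:
--                     tmp[a+i][b+j] = arr[a][b]
--     return tmp
-- ===== SOURCE B (Python) =====
-- def solution(key, lock):
--     L = len(lock)
--     K = len(key)
--     # invert the lock in place; lock now holds the grid the key must fill exactly
--     for i in range(L):
--         for j in range(L):
--             lock[i][j] = 1 if lock[i][j] == 0 else 0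
--     ones = [(r, c) for r in range(L) for c in range(L) if lock[r][c] == 1]
--     if not ones:
--         return True
--     r0, c0 = ones[0]
--
--     def orig(t, x, y):
--         # original key coordinates of cell (x, y) of the key rotated t times by 90 degrees
--         for _ in range(t):
--             x, y = K - 1 - y, x
--         return x, y
--
--     for t in range(4):
--         # candidate shifts: the reference 1-cell (r0, c0) must be covered by a key 1-cell
--         cand = set()
--         for x in range(K):
--             for y in range(K):
--                 i0, j0 = orig(t, x, y)
--                 if key[i0][j0] == 1:
--                     di, dj = r0 - x, c0 - y
--                     if -L < di < L and -L < dj < L: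
--                         cand.add((di, dj))
--         for di, dj in cand:
--             ok = True
--             for r in range(L):
--                 for c in range(L):
--                     a, b = r - di, c - dj
--                     if 0 <= a < K and 0 <= b < K:
--                         i0, j0 = orig(t, a, b)
--                         v = key[i0][j0]
--                     else:
--                         v = 0
--                     if v != lock[r][c]:
--                         ok = False
--                         break
--                 if not ok:
--                     break
--             if ok:
--                 return True
--     return False
-- ===== Notes on version B (the rewrite author's own statement) =====
-- stated objective: alternative
-- what changed: Instead of testing every shift in the (2L-1)^2 window by building a shifted L x L grid and comparing whole lists, B fixes one 1-cell of the inverted lock, derives the only candidate shifts that put a key 1-cell onto it (at most K^2 per rotation), and verifies each candidate cell-by-cell with early exit; rotations are handled by a coordinate map instead of materialising rotated grids; …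
-- outside the precondition, e.g. on solution([[1]], [[0, 7]]): A returns False, B returns True
import Mathlib
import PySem

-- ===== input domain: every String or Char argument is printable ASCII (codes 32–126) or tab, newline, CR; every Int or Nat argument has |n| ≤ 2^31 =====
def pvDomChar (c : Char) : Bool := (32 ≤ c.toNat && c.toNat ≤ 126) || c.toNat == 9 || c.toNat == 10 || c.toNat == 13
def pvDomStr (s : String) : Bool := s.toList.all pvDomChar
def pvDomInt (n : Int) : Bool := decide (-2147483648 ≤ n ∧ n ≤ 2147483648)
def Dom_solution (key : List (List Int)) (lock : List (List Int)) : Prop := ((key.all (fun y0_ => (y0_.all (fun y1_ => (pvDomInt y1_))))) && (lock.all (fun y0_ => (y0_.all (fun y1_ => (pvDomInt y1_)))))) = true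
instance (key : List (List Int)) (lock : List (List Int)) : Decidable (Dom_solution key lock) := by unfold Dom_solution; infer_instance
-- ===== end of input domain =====

-- B is an exact re-implementation of A on square grids: it prunes the shift search to the candidate
-- shifts that put a key 1-cell on one fixed 1-cell of the inverted lock (objective: alternative). Both A
-- and B mutate `lock` in place identically (inverting it); the theorems are about the return value.

-- shared primitives: Python's g[i][j] read and g[i][j] = v assignment on a list of lists
def pvGet (g : List (List Int)) (i j : Int) : Int :=
  PySem.List.pyGetD (PySem.List.pyGetD g i []) j 0

def pvSet (g : List (List Int)) (i j : Int) (v : Int) : List (List Int) :=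
  PySem.List.pySetD g i (PySem.List.pySetD (PySem.List.pyGetD g i []) j v)

-- ===== PORT A =====
def rotate_90 (arr : List (List Int)) : List (List Int) :=
  let n := arr.length
  let tmp := List.replicate n (List.replicate n (0 : Int))
  (PySem.List.pyRange 0 (n : Int) 1).foldl (fun tmp i =>
    (PySem.List.pyRange 0 (n : Int) 1).foldl (fun tmp j =>
      pvSet tmp j ((n : Int) - 1 - i) (pvGet arr i j)) tmp) tmp

def move_arr (arr : List (List Int)) (i j : Int) (length : Int) : List (List Int) :=
  let tmp := List.replicate length.toNat (List.replicate length.toNat (0 : Int))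
  (PySem.List.pyRange 0 (arr.length : Int) 1).foldl (fun tmp a =>
    (PySem.List.pyRange 0 (arr.length : Int) 1).foldl (fun tmp b =>
      if a + i < length ∧ 0 ≤ a + i then
        if b + j < length ∧ 0 ≤ b + j then pvSet tmp (a + i) (b + j) (pvGet arr a b) else tmp
      else tmp) tmp) tmp

def findA (key : List (List Int)) (lock : List (List Int)) : Bool :=
  let length := (lock.length : Int)
  (PySem.List.pyRange 0 length 1).any (fun i =>
    (PySem.List.pyRange 0 length 1).any (fun j =>
      move_arr key i j length == lock || move_arr key (-i) j length == lock ||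
        move_arr key i (-j) length == lock || move_arr key (-i) (-j) length == lock))

def solution (key : List (List Int)) (lock : List (List Int)) : Bool :=
  let st := (PySem.List.pyRange 0 (lock.length : Int) 1).foldl (fun st i =>
      (PySem.List.pyRange 0 (lock.length : Int) 1).foldl (fun st j =>
        if pvGet st.1 i j == 0 then (pvSet st.1 i j 1, (1 : Int))
        else (pvSet st.1 i j 0, st.2)) st) (lock, (0 : Int))
  let lock := st.1
  if st.2 == 0 then true
  else if findA key lock then true
  else
    let key1 := rotate_90 key
    if findA key1 lock then true
    else
      let key2 := rotate_90 key1
      if findA key2 lock then true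
      else
        let key3 := rotate_90 key2
        if findA key3 lock then true
        else false

-- ===== PORT B =====
def pvOrig (K : Int) (t : Nat) (x y : Int) : Int × Int :=
  (List.range t).foldl (fun p _ => (K - 1 - p.2, p.1)) (x, y)

def solution_alt (key : List (List Int)) (lock : List (List Int)) : Bool :=
  let L := (lock.length : Int)
  let K := (key.length : Int)
  let lock := (PySem.List.pyRange 0 L 1).foldl (fun g i =>
      (PySem.List.pyRange 0 L 1).foldl (fun g j =>
        pvSet g i j (if pvGet g i j == 0 then 1 else 0)) g) lock
  let ones := (PySem.List.pyRange 0 L 1).flatMap (fun r =>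
      ((PySem.List.pyRange 0 L 1).filter (fun c => pvGet lock r c == 1)).map (fun c => (r, c)))
  match ones with
  | [] => true
  | (r0, c0) :: _ =>
    (List.range 4).any (fun t =>
      let cand : PySem.Set (Int × Int) :=
        (PySem.List.pyRange 0 K 1).foldl (fun s x =>
          (PySem.List.pyRange 0 K 1).foldl (fun s y =>
            let p := pvOrig K t x y
            if pvGet key p.1 p.2 == 1 then
              let di := r0 - x
              let dj := c0 - y
              if -L < di ∧ di < L ∧ -L < dj ∧ dj < L then PySem.Set.add s (di, dj) else s
            else s) s) PySem.Set.empty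
      cand.any (fun d =>
        (PySem.List.pyRange 0 L 1).all (fun r =>
          (PySem.List.pyRange 0 L 1).all (fun c =>
            (if 0 ≤ r - d.1 ∧ r - d.1 < K ∧ 0 ≤ c - d.2 ∧ c - d.2 < K then
               let p := pvOrig K t (r - d.1) (c - d.2)
               pvGet key p.1 p.2
             else 0) == pvGet lock r c))))

-- ===== PRECONDITION & SPEC =====
-- Pre_ restricts to the puzzle's natural domain (a square lock grid, and key rows at least
-- len(key) long unless the lock has no 0-cell so the key is never read): a lock or key row
-- SHORTER than its grid makes Python A raise IndexError, and a lock row LONGER than the grid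
-- makes A's whole-list equality fail accidentally on malformed input.
def Pre_solution (key : List (List Int)) (lock : List (List Int)) : Prop :=
  (∀ row ∈ lock, row.length = lock.length) ∧
    ((∀ row ∈ key, key.length ≤ row.length) ∨
      (∀ row ∈ lock, ∀ v ∈ row, v ≠ 0))

instance (key : List (List Int)) (lock : List (List Int)) : Decidable (Pre_solution key lock) := by
  unfold Pre_solution; infer_instance

def pvWitness_solution : List (List Int) × List (List Int) := ([[1]], [[0]])

def Spec_solution (key : List (List Int)) (lock : List (List Int)) (out : Bool) : Prop := out = solution_alt key lock
instance (key : List (List Int)) (lock : List (List Int)) (out : Bool) : Decidable (Spec_solution key lock out) := by unfold Spec_solution; infer_instance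

-- ===== CLAIM (what is proved, stated in full; the proofs are below) =====
def Claim_equal_solution : Prop := ∀ (key : List (List Int)) (lock : List (List Int)), Dom_solution key lock → Pre_solution key lock → Spec_solution key lock (solution key lock)

-- ===== LEMMAS AND PROOFS =====

-- ---------- generic grid machinery (Nat-indexed views of the two ports' grids) ----------

/-- value of cell (r,c), 0 outside -/
def gN (g : List (List Int)) (r c : Nat) : Int := (g.getD r []).getD c 0

/-- length of row r, 0 outside -/
def rlen (g : List (List Int)) (r : Nat) : Nat := (g.getD r []).length

/-- write v at cell (i,j) (no-op outside) -/
def sN (g : List (List Int)) (i j : Nat) (v : Int) : List (List Int) := g.set i ((g.getD i []).set j v)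

/-- run a list of cell writes -/
def runW (ops : List ((Nat × Nat) × Int)) (g : List (List Int)) : List (List Int) :=
  ops.foldl (fun g o => sN g o.1.1 o.1.2 o.2) g

/-- all cells of an n×m grid, row-major -/
def cells (n m : Nat) : List (Nat × Nat) := (List.range n) ×ˢ (List.range m)

lemma getD_set_eq {α : Type} (l : List α) (i : Nat) (a : α) (r : Nat) (d : α) :
    (l.set i a).getD r d = if i = r ∧ i < l.length then a else l.getD r d := by
  rw [List.getD_eq_getElem?_getD, List.getElem?_set]
  by_cases h1 : i = r
  · subst h1
    by_cases h2 : i < l.length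
    · simp [h2, List.getD_eq_getElem?_getD]
    · have hn : l[i]? = none := List.getElem?_eq_none (by omega)
      simp [h2, List.getD_eq_getElem?_getD, hn]
  · simp [h1, List.getD_eq_getElem?_getD]

@[simp] lemma pvGet_natCast (g : List (List Int)) (r c : Nat) :
    pvGet g (r : Int) (c : Int) = gN g r c := by
  simp [pvGet, gN]

@[simp] lemma pvSet_natCast (g : List (List Int)) (i j : Nat) (v : Int) :
    pvSet g (i : Int) (j : Int) v = sN g i j v := by
  simp [pvSet, sN]

lemma pvGet_nonneg (g : List (List Int)) (a b : Int) (ha : 0 ≤ a) (hb : 0 ≤ b) :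
    pvGet g a b = gN g a.toNat b.toNat := by
  obtain ⟨an, rfl⟩ := Int.eq_ofNat_of_zero_le ha
  obtain ⟨bn, rfl⟩ := Int.eq_ofNat_of_zero_le hb
  simp

lemma pvSet_nonneg (g : List (List Int)) (a b : Int) (v : Int) (ha : 0 ≤ a) (hb : 0 ≤ b) :
    pvSet g a b v = sN g a.toNat b.toNat v := by
  obtain ⟨an, rfl⟩ := Int.eq_ofNat_of_zero_le ha
  obtain ⟨bn, rfl⟩ := Int.eq_ofNat_of_zero_le hb
  simp

@[simp] lemma length_sN (g : List (List Int)) (i j : Nat) (v : Int) :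
    (sN g i j v).length = g.length := by simp [sN]

@[simp] lemma rlen_sN (g : List (List Int)) (i j : Nat) (v : Int) (r : Nat) :
    rlen (sN g i j v) r = rlen g r := by
  unfold rlen sN
  rw [getD_set_eq]
  split_ifs with h
  · obtain ⟨rfl, _⟩ := h
    simp
  · rfl

lemma gN_sN (g : List (List Int)) (i j : Nat) (v : Int) (r c : Nat) :
    gN (sN g i j v) r c =
      if i = r ∧ j = c ∧ i < g.length ∧ j < rlen g i then v else gN g r c := by
  unfold gN sN rlen
  rw [getD_set_eq]
  by_cases h1 : i = r ∧ i < g.length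
  · obtain ⟨rfl, h2⟩ := h1
    rw [if_pos ⟨rfl, h2⟩, getD_set_eq]
    by_cases h3 : j = c ∧ j < (g.getD i []).length
    · rw [if_pos h3, if_pos ⟨rfl, h3.1, h2, h3.2⟩]
    · rw [if_neg h3, if_neg (by tauto)]
  · rw [if_neg h1, if_neg (by tauto)]

@[simp] lemma length_runW (ops : List ((Nat × Nat) × Int)) (g : List (List Int)) :
    (runW ops g).length = g.length := by
  induction ops generalizing g with
  | nil => rfl
  | cons o ops ih => simp [runW, List.foldl_cons] at ih ⊢; rw [ih]; simp

@[simp] lemma rlen_runW (ops : List ((Nat × Nat) × Int)) (g : List (List Int)) (r : Nat) :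
    rlen (runW ops g) r = rlen g r := by
  induction ops generalizing g with
  | nil => rfl
  | cons o ops ih => simp [runW, List.foldl_cons] at ih ⊢; rw [ih]; simp

lemma gN_runW_not_mem (ops : List ((Nat × Nat) × Int)) (g : List (List Int)) (r c : Nat)
    (h : (r, c) ∉ ops.map (·.1)) : gN (runW ops g) r c = gN g r c := by
  induction ops generalizing g with
  | nil => rfl
  | cons o ops ih =>
    rw [List.map_cons] at h
    have h1 : o.1 ≠ (r, c) := fun he => h (by simp [he])
    have h2 : (r, c) ∉ ops.map (·.1) := fun hm => h (List.mem_cons_of_mem _ hm)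
    rw [runW, List.foldl_cons]
    have h3 := ih (sN g o.1.1 o.1.2 o.2) h2
    rw [runW] at h3
    rw [h3, gN_sN, if_neg]
    rintro ⟨e1, e2, -⟩
    exact h1 (by rcases o with ⟨⟨a, b⟩, v⟩; simp_all)

lemma gN_runW_mem (ops : List ((Nat × Nat) × Int)) (g : List (List Int)) (r c : Nat) (v : Int)
    (hnd : (ops.map (·.1)).Nodup) (hm : ((r, c), v) ∈ ops)
    (hr : r < g.length) (hc : c < rlen g r) : gN (runW ops g) r c = v := by
  induction ops generalizing g with
  | nil => cases hm
  | cons o ops ih =>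
    simp only [List.map_cons, List.nodup_cons] at hnd
    rcases List.mem_cons.mp hm with h | h
    · subst h
      have hnot : (r, c) ∉ ops.map (·.1) := hnd.1
      have : gN (runW ops (sN g r c v)) r c = gN (sN g r c v) r c :=
        gN_runW_not_mem _ _ _ _ hnot
      rw [runW, List.foldl_cons]
      show gN (runW ops (sN g r c v)) r c = v
      rw [this, gN_sN, if_pos ⟨rfl, rfl, hr, hc⟩]
    · have htgt : o.1 ≠ (r, c) := by
        intro he
        exact hnd.1 (he ▸ (List.mem_map.mpr ⟨_, h, rfl⟩))
      rw [runW, List.foldl_cons]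
      exact ih (sN g o.1.1 o.1.2 o.2) hnd.2 h (by simpa using hr) (by simpa using hc)

lemma mem_cells {n m : Nat} {p : Nat × Nat} : p ∈ cells n m ↔ p.1 < n ∧ p.2 < m := by
  cases p; simp [cells, List.mem_product]

lemma nodup_cells (n m : Nat) : (cells n m).Nodup :=
  List.Nodup.product List.nodup_range List.nodup_range

lemma nested_foldl_cells {α : Type} (n m : Nat) (F : α → Int → Int → α) (s : α) :
    (PySem.List.pyRange 0 (n : Int) 1).foldl
      (fun s i => (PySem.List.pyRange 0 (m : Int) 1).foldl (fun s j => F s i j) s) s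
      = (cells n m).foldl (fun s p => F s (p.1 : Int) (p.2 : Int)) s := by
  have hc : cells n m = (List.range n).flatMap (fun a => (List.range m).map (Prod.mk a)) := rfl
  simp only [PySem.List.pyRange_zero_nat]
  rw [hc, List.foldl_flatMap, List.foldl_map]
  apply PySem.List.foldl_congr_mem
  intro acc x _
  rw [List.foldl_map, List.foldl_map]

-- ---------- the inverted lock ----------

def vinv (g : List (List Int)) (p : Nat × Nat) : Int := if gN g p.1 p.2 == 0 then 1 else 0

def ivOps (lock : List (List Int)) : List ((Nat × Nat) × Int) :=
  (cells lock.length lock.length).map (fun p => (p, vinv lock p))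

def ivG (lock : List (List Int)) : List (List Int) := runW (ivOps lock) lock

lemma gN_sN_ne (g : List (List Int)) (q p : Nat × Nat) (v : Int) (hne : q ≠ p) :
    gN (sN g q.1 q.2 v) p.1 p.2 = gN g p.1 p.2 := by
  rw [gN_sN, if_neg]
  rintro ⟨e1, e2, -⟩
  exact hne (by rcases q with ⟨a, b⟩; rcases p with ⟨c, d⟩; simp_all)

lemma invert_pair_foldl (cs : List (Nat × Nat)) (hnd : cs.Nodup) (g : List (List Int)) (ch : Int) :
    cs.foldl (fun st p => if gN st.1 p.1 p.2 == 0 then (sN st.1 p.1 p.2 1, (1 : Int))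
      else (sN st.1 p.1 p.2 0, st.2)) (g, ch)
      = (runW (cs.map (fun p => (p, vinv g p))) g,
         if ∃ p ∈ cs, gN g p.1 p.2 = 0 then 1 else ch) := by
  induction cs generalizing g ch with
  | nil => simp [runW]
  | cons q cs ih =>
    obtain ⟨hq, hnd'⟩ := List.nodup_cons.mp hnd
    rw [List.foldl_cons]
    have hstep : (if gN (g, ch).1 q.1 q.2 == 0 then (sN (g, ch).1 q.1 q.2 1, (1 : Int))
        else (sN (g, ch).1 q.1 q.2 0, (g, ch).2))
        = (sN g q.1 q.2 (vinv g q), if gN g q.1 q.2 = 0 then (1 : Int) else ch) := by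
      by_cases h : gN g q.1 q.2 = 0 <;> simp [vinv, h]
    rw [hstep, ih hnd']
    have hgv : ∀ p ∈ cs, gN (sN g q.1 q.2 (vinv g q)) p.1 p.2 = gN g p.1 p.2 := fun p hp =>
      gN_sN_ne g q p _ (fun he => hq (he ▸ hp))
    have hmapeq : (cs.map fun p => (p, vinv (sN g q.1 q.2 (vinv g q)) p))
        = cs.map (fun p => (p, vinv g p)) :=
      List.map_congr_left (fun p hp => by
        have h2 := hgv p hp
        simp only [vinv, beq_iff_eq] at h2 ⊢
        rw [h2])
    rw [hmapeq]
    have hiff : (∃ p ∈ cs, gN (sN g q.1 q.2 (vinv g q)) p.1 p.2 = 0) ↔ ∃ p ∈ cs, gN g p.1 p.2 = 0 :=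
      ⟨fun ⟨p, hp, hv⟩ => ⟨p, hp, (hgv p hp) ▸ hv⟩, fun ⟨p, hp, hv⟩ => ⟨p, hp, (hgv p hp).symm ▸ hv⟩⟩
    refine Prod.ext rfl ?_
    show (if ∃ p ∈ cs, gN (sN g q.1 q.2 (vinv g q)) p.1 p.2 = 0 then 1
        else if gN g q.1 q.2 = 0 then (1 : Int) else ch)
      = (if ∃ p ∈ q :: cs, gN g p.1 p.2 = 0 then 1 else ch)
    rw [if_congr hiff rfl rfl]
    by_cases h : gN g q.1 q.2 = 0
    · rw [if_pos (show ∃ p ∈ q :: cs, gN g p.1 p.2 = 0 from ⟨q, List.mem_cons_self, h⟩)]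
      split_ifs <;> rfl
    · simp only [h, if_false]
      have hcons : (∃ p ∈ q :: cs, gN g p.1 p.2 = 0) ↔ ∃ p ∈ cs, gN g p.1 p.2 = 0 := by
        simp only [List.mem_cons]
        constructor
        · rintro ⟨p, hp | hp, hv⟩
          · exact absurd (hp ▸ hv) h
          · exact ⟨p, hp, hv⟩
        · rintro ⟨p, hp, hv⟩
          exact ⟨p, Or.inr hp, hv⟩
      exact if_congr hcons.symm rfl rfl

lemma invert_grid_foldl (cs : List (Nat × Nat)) (hnd : cs.Nodup) (g : List (List Int)) :
    cs.foldl (fun g p => sN g p.1 p.2 (if gN g p.1 p.2 == 0 then 1 else 0)) g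
      = runW (cs.map (fun p => (p, vinv g p))) g := by
  induction cs generalizing g with
  | nil => simp [runW]
  | cons q cs ih =>
    obtain ⟨hq, hnd'⟩ := List.nodup_cons.mp hnd
    rw [List.foldl_cons, List.map_cons, runW, List.foldl_cons]
    show cs.foldl _ (sN g q.1 q.2 (vinv g q)) = _
    rw [ih hnd']
    congr 1
    refine List.map_congr_left (fun p hp => ?_)
    have h2 := gN_sN_ne g q p (vinv g q) (fun he => hq (he ▸ hp))
    simp only [vinv, beq_iff_eq] at h2 ⊢
    rw [h2]

lemma length_ivG (lock : List (List Int)) : (ivG lock).length = lock.length := by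
  simp [ivG]

lemma rlen_ivG (lock : List (List Int)) (r : Nat) : rlen (ivG lock) r = rlen lock r := by
  simp [ivG]

lemma rlen_lock_ge (lock : List (List Int)) (hpre : ∀ row ∈ lock, lock.length ≤ row.length)
    (r : Nat) (hr : r < lock.length) : lock.length ≤ rlen lock r := by
  have hmem : lock.getD r [] ∈ lock := by
    rw [List.getD_eq_getElem _ _ hr]; exact List.getElem_mem _
  exact hpre _ hmem

lemma targets_ivOps (lock : List (List Int)) :
    (ivOps lock).map (·.1) = cells lock.length lock.length := by
  simp [ivOps, List.map_map, Function.comp_def]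

lemma gN_ivG (lock : List (List Int)) (hpre : ∀ row ∈ lock, lock.length ≤ row.length)
    (r c : Nat) (hr : r < lock.length) (hc : c < lock.length) :
    gN (ivG lock) r c = if gN lock r c = 0 then 1 else 0 := by
  have h := gN_runW_mem (ivOps lock) lock r c (vinv lock (r, c))
    (by rw [targets_ivOps]; exact nodup_cells _ _)
    (List.mem_map.mpr ⟨(r, c), mem_cells.mpr ⟨hr, hc⟩, rfl⟩)
    hr (lt_of_lt_of_le hc (rlen_lock_ge lock hpre r hr))
  rw [ivG, h, vinv]
  split_ifs with h1 <;> simp_all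

-- ---------- replicate base grid ----------

lemma getD_replicate' {α : Type} (n : Nat) (x : α) (r : Nat) (d : α) :
    (List.replicate n x).getD r d = if r < n then x else d := by
  by_cases h : r < n
  · rw [List.getD_eq_getElem _ _ (by simpa using h), List.getElem_replicate, if_pos h]
  · rw [List.getD_eq_getElem?_getD, List.getElem?_eq_none (by simpa using h), if_neg h]
    rfl

lemma rlen_repl (n : Nat) (r : Nat) (hr : r < n) :
    rlen (List.replicate n (List.replicate n (0 : Int))) r = n := by
  unfold rlen
  rw [getD_replicate', if_pos hr]
  simp

lemma gN_repl (n : Nat) (r c : Nat) : gN (List.replicate n (List.replicate n (0 : Int))) r c = 0 := by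
  unfold gN
  rw [getD_replicate']
  split_ifs with h
  · rw [getD_replicate']
    split_ifs <;> rfl
  · rfl

-- ---------- move_arr pointwise ----------

def moveOps (arr : List (List Int)) (i j : Int) (n : Nat) : List ((Nat × Nat) × Int) :=
  ((cells arr.length arr.length).filter
      (fun p => decide ((((p.1 : Int) + i < (n : Int) ∧ 0 ≤ (p.1 : Int) + i) ∧
        ((p.2 : Int) + j < (n : Int) ∧ 0 ≤ (p.2 : Int) + j))))).map
    (fun p => ((((p.1 : Int) + i).toNat, ((p.2 : Int) + j).toNat), gN arr p.1 p.2))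

lemma move_arr_eq (arr : List (List Int)) (i j : Int) (n : Nat) :
    move_arr arr i j (n : Int) = runW (moveOps arr i j n) (List.replicate n (List.replicate n (0 : Int))) := by
  unfold move_arr
  simp only [Int.toNat_natCast]
  rw [nested_foldl_cells (F := fun tmp a b =>
    if a + i < (n : Int) ∧ 0 ≤ a + i then
      if b + j < (n : Int) ∧ 0 ≤ b + j then pvSet tmp (a + i) (b + j) (pvGet arr a b) else tmp
    else tmp)]
  rw [PySem.List.foldl_congr_mem (g := fun tmp (p : Nat × Nat) =>
    if (((p.1 : Int) + i < (n : Int) ∧ 0 ≤ (p.1 : Int) + i) ∧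
        ((p.2 : Int) + j < (n : Int) ∧ 0 ≤ (p.2 : Int) + j)) then
      sN tmp ((p.1 : Int) + i).toNat ((p.2 : Int) + j).toNat (gN arr p.1 p.2) else tmp)]
  · rw [PySem.List.foldl_ite_eq_foldl_filter, moveOps, runW, List.foldl_map]
  · intro tmp p _
    by_cases h1 : (p.1 : Int) + i < (n : Int) ∧ 0 ≤ (p.1 : Int) + i
    · by_cases h2 : (p.2 : Int) + j < (n : Int) ∧ 0 ≤ (p.2 : Int) + j
      · rw [if_pos h1, if_pos h2, if_pos ⟨h1, h2⟩, pvSet_nonneg _ _ _ _ h1.2 h2.2, pvGet_natCast]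
      · rw [if_pos h1, if_neg h2, if_neg (by tauto)]
    · rw [if_neg h1, if_neg (by tauto)]

lemma nodup_targets_moveOps (arr : List (List Int)) (i j : Int) (n : Nat) :
    ((moveOps arr i j n).map (·.1)).Nodup := by
  rw [moveOps, List.map_map]
  refine List.Nodup.map_on ?_ (((nodup_cells _ _)).filter _)
  intro p hp q hq he
  have hp' := (List.mem_filter.mp hp).2
  have hq' := (List.mem_filter.mp hq).2
  simp only [decide_eq_true_eq] at hp' hq'
  simp only [Function.comp_apply, Prod.mk.injEq] at he
  rcases p with ⟨a, b⟩; rcases q with ⟨c, d⟩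
  simp only [Prod.mk.injEq]
  omega

lemma length_move_arr (arr : List (List Int)) (i j : Int) (n : Nat) :
    (move_arr arr i j (n : Int)).length = n := by
  rw [move_arr_eq]; simp

lemma rlen_move_arr (arr : List (List Int)) (i j : Int) (n : Nat) (r : Nat) (hr : r < n) :
    rlen (move_arr arr i j (n : Int)) r = n := by
  rw [move_arr_eq]; rw [rlen_runW]; exact rlen_repl n r hr

lemma gN_move_arr (arr : List (List Int)) (i j : Int) (n : Nat) (r c : Nat)
    (hr : r < n) (hc : c < n) :
    gN (move_arr arr i j (n : Int)) r c =
      if 0 ≤ (r : Int) - i ∧ (r : Int) - i < (arr.length : Int) ∧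
          0 ≤ (c : Int) - j ∧ (c : Int) - j < (arr.length : Int)
      then gN arr ((r : Int) - i).toNat ((c : Int) - j).toNat else 0 := by
  rw [move_arr_eq]
  split_ifs with h
  · refine gN_runW_mem _ _ _ _ _ (nodup_targets_moveOps arr i j n) ?_
      (by simpa using hr) (by rw [rlen_repl n r hr]; exact hc)
    refine List.mem_map.mpr ⟨(((r : Int) - i).toNat, ((c : Int) - j).toNat), ?_, ?_⟩
    · refine List.mem_filter.mpr ⟨mem_cells.mpr ⟨by omega, by omega⟩, ?_⟩
      simp only [decide_eq_true_eq]
      constructor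
      · constructor <;> omega
      · constructor <;> omega
    · refine Prod.ext (Prod.ext ?_ ?_) rfl
      · show ((((((r : Int) - i).toNat : Nat) : Int) + i)).toNat = r
        omega
      · show ((((((c : Int) - j).toNat : Nat) : Int) + j)).toNat = c
        omega
  · have hnm : (r, c) ∉ (moveOps arr i j n).map (·.1) := by
      intro hmem
      rw [moveOps, List.map_map] at hmem
      obtain ⟨p, hp, he⟩ := List.mem_map.mp hmem
      have hp' := (List.mem_filter.mp hp).2
      simp only [decide_eq_true_eq] at hp'
      simp only [Function.comp_apply, Prod.mk.injEq] at he
      have hpc := mem_cells.mp (List.mem_filter.mp hp).1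
      refine h ⟨by omega, by omega, by omega, by omega⟩
    rw [gN_runW_not_mem _ _ _ _ hnm, gN_repl]

-- ---------- rotate_90 pointwise ----------

def rotOps (arr : List (List Int)) : List ((Nat × Nat) × Int) :=
  (cells arr.length arr.length).map
    (fun p => ((p.2, arr.length - 1 - p.1), gN arr p.1 p.2))

lemma rotate_eq (arr : List (List Int)) :
    rotate_90 arr = runW (rotOps arr)
      (List.replicate arr.length (List.replicate arr.length (0 : Int))) := by
  unfold rotate_90
  rw [nested_foldl_cells (F := fun tmp i j => pvSet tmp j ((arr.length : Int) - 1 - i) (pvGet arr i j))]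
  rw [PySem.List.foldl_congr_mem (g := fun tmp (p : Nat × Nat) =>
    sN tmp p.2 (arr.length - 1 - p.1) (gN arr p.1 p.2))]
  · rw [rotOps, runW, List.foldl_map]
  · intro tmp p hp
    have hb := mem_cells.mp hp
    have h1 : ((arr.length : Int) - 1 - (p.1 : Int)) = ((arr.length - 1 - p.1 : Nat) : Int) := by omega
    rw [h1, pvGet_natCast, pvSet_natCast]

lemma nodup_targets_rotOps (arr : List (List Int)) : ((rotOps arr).map (·.1)).Nodup := by
  rw [rotOps, List.map_map]
  refine List.Nodup.map_on ?_ (nodup_cells _ _)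
  intro p hp q hq he
  have hp' := mem_cells.mp hp
  have hq' := mem_cells.mp hq
  simp only [Function.comp_apply, Prod.mk.injEq] at he
  rcases p with ⟨a, b⟩; rcases q with ⟨c, d⟩
  simp only [Prod.mk.injEq]
  omega

lemma length_rotate (arr : List (List Int)) : (rotate_90 arr).length = arr.length := by
  rw [rotate_eq]; simp

lemma gN_rotate (arr : List (List Int)) (x y : Nat) (hx : x < arr.length) (hy : y < arr.length) :
    gN (rotate_90 arr) x y = gN arr (arr.length - 1 - y) x := by
  rw [rotate_eq]
  refine gN_runW_mem _ _ _ _ _ (nodup_targets_rotOps arr) ?_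
    (by simpa using hx) (by rw [rlen_repl _ x hx]; exact hy)
  refine List.mem_map.mpr ⟨(arr.length - 1 - y, x), mem_cells.mpr ⟨by omega, hx⟩, ?_⟩
  refine Prod.ext (Prod.ext rfl ?_) rfl
  show arr.length - 1 - (arr.length - 1 - y) = y
  omega

-- ---------- iterated rotation and the coordinate map ----------

def rotIter (t : Nat) (key : List (List Int)) : List (List Int) := rotate_90^[t] key

lemma rotIter_zero (key : List (List Int)) : rotIter 0 key = key := rfl

lemma rotIter_succ (t : Nat) (key : List (List Int)) :
    rotIter (t + 1) key = rotate_90 (rotIter t key) := Function.iterate_succ_apply' _ _ _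

lemma length_rotIter (t : Nat) (key : List (List Int)) : (rotIter t key).length = key.length := by
  induction t with
  | zero => rfl
  | succ t ih => rw [rotIter_succ, length_rotate, ih]

def oN (K : Nat) (t : Nat) (p : Nat × Nat) : Nat × Nat :=
  (fun p : Nat × Nat => (K - 1 - p.2, p.1))^[t] p

lemma oN_succ (K : Nat) (t : Nat) (p : Nat × Nat) :
    oN K (t + 1) p = oN K t (K - 1 - p.2, p.1) := Function.iterate_succ_apply _ _ _

lemma gN_rotIter (t : Nat) (key : List (List Int)) (x y : Nat)
    (hx : x < key.length) (hy : y < key.length) :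
    gN (rotIter t key) x y = gN key (oN key.length t (x, y)).1 (oN key.length t (x, y)).2 := by
  induction t generalizing x y with
  | zero => rfl
  | succ t ih =>
    rw [rotIter_succ]
    have hlen : (rotIter t key).length = key.length := length_rotIter t key
    rw [gN_rotate _ x y (by rw [hlen]; exact hx) (by rw [hlen]; exact hy), hlen]
    rw [ih (key.length - 1 - y) x (by omega) hx]
    rw [oN_succ]

lemma pvOrig_eq_iterate (K : Int) (t : Nat) (x y : Int) :
    pvOrig K t x y = (fun p : Int × Int => (K - 1 - p.2, p.1))^[t] (x, y) := by
  induction t with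
  | zero => rfl
  | succ t ih =>
    rw [pvOrig, List.range_succ, List.foldl_append, List.foldl_cons, List.foldl_nil]
    rw [show (List.range t).foldl (fun (p : Int × Int) _ => (K - 1 - p.2, p.1)) (x, y) = pvOrig K t x y from rfl]
    rw [ih, Function.iterate_succ_apply']

lemma pvOrig_natCast (K t : Nat) (x y : Nat) (hx : x < K) (hy : y < K) :
    pvOrig (K : Int) t (x : Int) (y : Int)
      = (((oN K t (x, y)).1 : Int), ((oN K t (x, y)).2 : Int)) := by
  induction t generalizing x y with
  | zero => rfl
  | succ t ih =>
    rw [pvOrig_eq_iterate, Function.iterate_succ_apply, ← pvOrig_eq_iterate, oN_succ]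
    show pvOrig (K : Int) t ((K : Int) - 1 - (y : Int)) (x : Int)
      = (((oN K t (K - 1 - y, x)).1 : Int), ((oN K t (K - 1 - y, x)).2 : Int))
    have h1 : (K : Int) - 1 - (y : Int) = ((K - 1 - y : Nat) : Int) := by omega
    rw [h1]
    exact ih (K - 1 - y) x (by omega) hx

-- ---------- grid equality is pointwise equality ----------

lemma grid_eq_iff_pointwise (g h : List (List Int)) (L : Nat)
    (hg1 : g.length = L) (hh1 : h.length = L)
    (hg2 : ∀ r < L, rlen g r = L) (hh2 : ∀ r < L, rlen h r = L) :
    g = h ↔ ∀ r < L, ∀ c < L, gN g r c = gN h r c := by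
  constructor
  · rintro rfl
    intro _ _ _ _
    rfl
  · intro hpt
    refine List.ext_getElem (by omega) ?_
    intro r h1 h2
    have hrL : r < L := by omega
    have e1 : rlen g r = L := hg2 r hrL
    have e2 : rlen h r = L := hh2 r hrL
    unfold rlen at e1 e2
    rw [List.getD_eq_getElem _ _ h1] at e1
    rw [List.getD_eq_getElem _ _ h2] at e2
    refine List.ext_getElem (by omega) ?_
    intro c hc1 hc2
    have hcL : c < L := by omega
    have := hpt r hrL c hcL
    unfold gN at this
    rw [List.getD_eq_getElem _ _ h1, List.getD_eq_getElem _ _ h2] at this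
    rw [List.getD_eq_getElem _ _ hc1, List.getD_eq_getElem _ _ hc2] at this
    exact this

-- ---------- characterising find ----------

lemma findA_iff (kt ivl : List (List Int)) :
    findA kt ivl = true ↔ ∃ di dj : Int,
      (-(ivl.length : Int) < di ∧ di < ivl.length ∧ -(ivl.length : Int) < dj ∧ dj < ivl.length) ∧
        move_arr kt di dj (ivl.length : Int) = ivl := by
  unfold findA
  simp only [List.any_eq_true, PySem.List.mem_pyRange_one, Bool.or_eq_true, beq_iff_eq]
  constructor
  · rintro ⟨i, ⟨hi0, hiL⟩, j, ⟨hj0, hjL⟩, h4⟩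
    rcases h4 with ((h | h) | h) | h
    · exact ⟨i, j, by constructor; omega; constructor; omega; constructor <;> omega, h⟩
    · exact ⟨-i, j, by constructor; omega; constructor; omega; constructor <;> omega, h⟩
    · exact ⟨i, -j, by constructor; omega; constructor; omega; constructor <;> omega, h⟩
    · exact ⟨-i, -j, by constructor; omega; constructor; omega; constructor <;> omega, h⟩
  · rintro ⟨di, dj, ⟨w1, w2, w3, w4⟩, he⟩
    by_cases hdi : 0 ≤ di <;> by_cases hdj : 0 ≤ dj
    · exact ⟨di, ⟨hdi, w2⟩, dj, ⟨hdj, w4⟩, Or.inl (Or.inl (Or.inl he))⟩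
    · refine ⟨di, ⟨hdi, w2⟩, -dj, ⟨by omega, by omega⟩, Or.inl (Or.inr ?_)⟩
      rw [neg_neg]
      exact he
    · refine ⟨-di, ⟨by omega, by omega⟩, dj, ⟨hdj, w4⟩, Or.inl (Or.inl (Or.inr ?_))⟩
      rw [neg_neg]
      exact he
    · refine ⟨-di, ⟨by omega, by omega⟩, -dj, ⟨by omega, by omega⟩, Or.inr ?_⟩
      rw [neg_neg, neg_neg]
      exact he

-- ---------- the pointwise match predicate ----------

def PtM (key lock : List (List Int)) (t : Nat) (di dj : Int) : Prop :=
  ∀ r < lock.length, ∀ c < lock.length,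
    (if 0 ≤ (r : Int) - di ∧ (r : Int) - di < (key.length : Int) ∧
        0 ≤ (c : Int) - dj ∧ (c : Int) - dj < (key.length : Int)
     then gN key (oN key.length t (((r : Int) - di).toNat, ((c : Int) - dj).toNat)).1
            (oN key.length t (((r : Int) - di).toNat, ((c : Int) - dj).toNat)).2
     else 0) = (if gN lock r c = 0 then 1 else 0)

lemma moveA_iff (key lock : List (List Int)) (hpre : ∀ row ∈ lock, lock.length ≤ row.length)
    (hrows : ∀ r < lock.length, rlen lock r = lock.length) (t : Nat) (di dj : Int) :
    move_arr (rotIter t key) di dj (lock.length : Int) = ivG lock ↔ PtM key lock t di dj := by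
  rw [grid_eq_iff_pointwise _ _ lock.length (length_move_arr _ _ _ _) (length_ivG _)
    (fun r hr => rlen_move_arr _ _ _ _ r hr)
    (fun r hr => by rw [rlen_ivG]; exact hrows r hr)]
  unfold PtM
  refine forall_congr' fun r => forall_congr' fun hr => forall_congr' fun c => forall_congr' fun hc => ?_
  rw [gN_move_arr _ _ _ _ r c hr hc, length_rotIter, gN_ivG lock hpre r c hr hc]
  have hbr : (if 0 ≤ (r : Int) - di ∧ (r : Int) - di < (key.length : Int) ∧
        0 ≤ (c : Int) - dj ∧ (c : Int) - dj < (key.length : Int)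
      then gN (rotIter t key) ((r : Int) - di).toNat ((c : Int) - dj).toNat else 0)
      = (if 0 ≤ (r : Int) - di ∧ (r : Int) - di < (key.length : Int) ∧
        0 ≤ (c : Int) - dj ∧ (c : Int) - dj < (key.length : Int)
      then gN key (oN key.length t (((r : Int) - di).toNat, ((c : Int) - dj).toNat)).1
            (oN key.length t (((r : Int) - di).toNat, ((c : Int) - dj).toNat)).2 else 0) := by
    split_ifs with h
    · exact gN_rotIter t key _ _ (by omega) (by omega)
    · rfl
  rw [hbr]

-- ---------- B's pieces, named (each is definitionally the corresponding let-bound term of solution_alt) ----------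

def ivB (key lock : List (List Int)) : List (List Int) :=
  (PySem.List.pyRange 0 (lock.length : Int) 1).foldl (fun g i =>
    (PySem.List.pyRange 0 (lock.length : Int) 1).foldl (fun g j =>
      pvSet g i j (if pvGet g i j == 0 then 1 else 0)) g) lock

def onesT (key lock : List (List Int)) : List (Int × Int) :=
  (PySem.List.pyRange 0 (lock.length : Int) 1).flatMap (fun r =>
    ((PySem.List.pyRange 0 (lock.length : Int) 1).filter
      (fun c => pvGet (ivB key lock) r c == 1)).map (fun c => (r, c)))

def candT (key : List (List Int)) (L : Int) (r0 c0 : Int) (t : Nat) : PySem.Set (Int × Int) :=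
  (PySem.List.pyRange 0 (key.length : Int) 1).foldl (fun s x =>
    (PySem.List.pyRange 0 (key.length : Int) 1).foldl (fun s y =>
      let p := pvOrig (key.length : Int) t x y
      if pvGet key p.1 p.2 == 1 then
        let di := r0 - x
        let dj := c0 - y
        if -L < di ∧ di < L ∧ -L < dj ∧ dj < L then PySem.Set.add s (di, dj) else s
      else s) s) PySem.Set.empty

def bckT (key lock : List (List Int)) (t : Nat) (d : Int × Int) : Bool :=
  (PySem.List.pyRange 0 (lock.length : Int) 1).all (fun r =>
    (PySem.List.pyRange 0 (lock.length : Int) 1).all (fun c =>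
      (if 0 ≤ r - d.1 ∧ r - d.1 < (key.length : Int) ∧ 0 ≤ c - d.2 ∧ c - d.2 < (key.length : Int) then
         let p := pvOrig (key.length : Int) t (r - d.1) (c - d.2)
         pvGet key p.1 p.2
       else 0) == pvGet (ivB key lock) r c))

lemma alt_eq (key lock : List (List Int)) :
    solution_alt key lock =
      (match onesT key lock with
       | [] => true
       | (r0, c0) :: _ =>
         (List.range 4).any (fun t =>
           (candT key (lock.length : Int) r0 c0 t).any (fun d => bckT key lock t d))) := rfl

lemma ivB_eq (key lock : List (List Int)) : ivB key lock = ivG lock := by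
  unfold ivB
  rw [nested_foldl_cells (F := fun g i j => pvSet g i j (if pvGet g i j == 0 then 1 else 0))]
  simp only [pvGet_natCast, pvSet_natCast]
  rw [invert_grid_foldl _ (nodup_cells _ _) lock]
  rfl

lemma A_invert (key lock : List (List Int)) :
    ((PySem.List.pyRange 0 (lock.length : Int) 1).foldl (fun st i =>
      (PySem.List.pyRange 0 (lock.length : Int) 1).foldl (fun st j =>
        if pvGet st.1 i j == 0 then (pvSet st.1 i j 1, (1 : Int))
        else (pvSet st.1 i j 0, st.2)) st) (lock, (0 : Int)))
    = (ivG lock, if ∃ p ∈ cells lock.length lock.length, gN lock p.1 p.2 = 0 then 1 else 0) := by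
  rw [nested_foldl_cells (F := fun st i j =>
    if pvGet st.1 i j == 0 then (pvSet st.1 i j 1, (1 : Int)) else (pvSet st.1 i j 0, st.2))]
  simp only [pvGet_natCast, pvSet_natCast]
  rw [invert_pair_foldl _ (nodup_cells _ _) lock 0]
  rfl

lemma gN_ivG_one_iff (lock : List (List Int)) (hpre : ∀ row ∈ lock, lock.length ≤ row.length)
    (r c : Nat) (hr : r < lock.length) (hc : c < lock.length) :
    gN (ivG lock) r c = 1 ↔ gN lock r c = 0 := by
  rw [gN_ivG lock hpre r c hr hc]
  split_ifs with h <;> simp [h]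

lemma onesT_nil_iff (key lock : List (List Int)) (hpre : ∀ row ∈ lock, lock.length ≤ row.length) :
    onesT key lock = [] ↔ ∀ p ∈ cells lock.length lock.length, gN lock p.1 p.2 ≠ 0 := by
  unfold onesT
  rw [ivB_eq, List.flatMap_eq_nil_iff]
  constructor
  · intro h p hp
    obtain ⟨h1, h2⟩ := mem_cells.mp hp
    have hr : (p.1 : Int) ∈ PySem.List.pyRange 0 (lock.length : Int) 1 :=
      PySem.List.mem_pyRange_one.mpr ⟨by omega, by omega⟩
    have := h _ hr
    rw [List.map_eq_nil_iff, List.filter_eq_nil_iff] at this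
    have hc : (p.2 : Int) ∈ PySem.List.pyRange 0 (lock.length : Int) 1 :=
      PySem.List.mem_pyRange_one.mpr ⟨by omega, by omega⟩
    have h3 := this _ hc
    rw [pvGet_natCast] at h3
    intro hz
    exact h3 (by rw [beq_iff_eq]; exact (gN_ivG_one_iff lock hpre p.1 p.2 h1 h2).mpr hz)
  · intro h r hr
    rw [List.map_eq_nil_iff, List.filter_eq_nil_iff]
    intro c hc
    obtain ⟨hr0, hrL⟩ := PySem.List.mem_pyRange_one.mp hr
    obtain ⟨hc0, hcL⟩ := PySem.List.mem_pyRange_one.mp hc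
    rw [pvGet_nonneg _ _ _ hr0 hc0, beq_iff_eq]
    rw [gN_ivG_one_iff lock hpre r.toNat c.toNat (by omega) (by omega)]
    exact h (r.toNat, c.toNat) (mem_cells.mpr ⟨by omega, by omega⟩)

lemma onesT_head (key lock : List (List Int)) (hpre : ∀ row ∈ lock, lock.length ≤ row.length)
    (r0 c0 : Int) (tl : List (Int × Int)) (h : onesT key lock = (r0, c0) :: tl) :
    0 ≤ r0 ∧ r0 < lock.length ∧ 0 ≤ c0 ∧ c0 < lock.length ∧ gN lock r0.toNat c0.toNat = 0 := by
  have hm : (r0, c0) ∈ onesT key lock := by rw [h]; exact List.mem_cons_self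
  unfold onesT at hm
  rw [ivB_eq] at hm
  obtain ⟨r, hr, hm2⟩ := List.mem_flatMap.mp hm
  obtain ⟨c, hc, he⟩ := List.mem_map.mp hm2
  injection he with he1 he2
  rw [← he1, ← he2]
  obtain ⟨hr0, hrL⟩ := PySem.List.mem_pyRange_one.mp hr
  obtain ⟨hc2, hcv⟩ := List.mem_filter.mp hc
  obtain ⟨hc0, hcL⟩ := PySem.List.mem_pyRange_one.mp hc2
  rw [pvGet_nonneg _ _ _ hr0 hc0, beq_iff_eq] at hcv
  refine ⟨hr0, by omega, hc0, by omega, ?_⟩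
  exact (gN_ivG_one_iff lock hpre r.toNat c.toNat (by omega) (by omega)).mp hcv

lemma mem_foldl_set_add (l : List (Nat × Nat)) (P : Nat × Nat → Prop) [DecidablePred P]
    (w : Nat × Nat → Int × Int) (s0 : PySem.Set (Int × Int)) (d : Int × Int) :
    (d ∈ l.foldl (fun s x => if P x then PySem.Set.add s (w x) else s) s0) ↔
      d ∈ s0 ∨ ∃ x ∈ l, P x ∧ d = w x := by
  induction l generalizing s0 with
  | nil => simp
  | cons b l ih =>
    rw [List.foldl_cons]
    by_cases h : P b
    · rw [if_pos h, ih, PySem.Set.mem_add]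
      simp only [List.mem_cons]
      constructor
      · rintro (⟨hs | he⟩ | ⟨x, hx, hp, hd⟩)
        · exact Or.inl hs
        · exact Or.inr ⟨b, Or.inl rfl, h, he⟩
        · exact Or.inr ⟨x, Or.inr hx, hp, hd⟩
      · rintro (hs | ⟨x, rfl | hx, hp, hd⟩)
        · exact Or.inl (Or.inl hs)
        · exact Or.inl (Or.inr hd)
        · exact Or.inr ⟨x, hx, hp, hd⟩
    · rw [if_neg h, ih]
      simp only [List.mem_cons]
      constructor
      · rintro (hs | ⟨x, hx, hp, hd⟩)
        · exact Or.inl hs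
        · exact Or.inr ⟨x, Or.inr hx, hp, hd⟩
      · rintro (hs | ⟨x, rfl | hx, hp, hd⟩)
        · exact Or.inl hs
        · exact absurd hp h
        · exact Or.inr ⟨x, hx, hp, hd⟩

lemma candT_mem (key : List (List Int)) (L : Nat) (r0 c0 : Int) (t : Nat) (d : Int × Int) :
    d ∈ candT key (L : Int) r0 c0 t ↔ ∃ x y : Nat, x < key.length ∧ y < key.length ∧
      gN key (oN key.length t (x, y)).1 (oN key.length t (x, y)).2 = 1 ∧
      (-(L : Int) < r0 - (x : Int) ∧ r0 - (x : Int) < L ∧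
        -(L : Int) < c0 - (y : Int) ∧ c0 - (y : Int) < L) ∧
      d = (r0 - (x : Int), c0 - (y : Int)) := by
  unfold candT
  rw [nested_foldl_cells (F := fun s x y =>
    let p := pvOrig (key.length : Int) t x y
    if pvGet key p.1 p.2 == 1 then
      let di := r0 - x
      let dj := c0 - y
      if -(L : Int) < di ∧ di < L ∧ -(L : Int) < dj ∧ dj < L then PySem.Set.add s (di, dj) else s
    else s)]
  rw [PySem.List.foldl_congr_mem (g := fun s (p : Nat × Nat) =>
    if (gN key (oN key.length t p).1 (oN key.length t p).2 = 1 ∧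
        (-(L : Int) < r0 - (p.1 : Int) ∧ r0 - (p.1 : Int) < L ∧
          -(L : Int) < c0 - (p.2 : Int) ∧ c0 - (p.2 : Int) < L))
    then PySem.Set.add s (r0 - (p.1 : Int), c0 - (p.2 : Int)) else s)]
  · rw [mem_foldl_set_add]
    simp only [PySem.Set.empty, List.not_mem_nil, false_or]
    constructor
    · rintro ⟨p, hp, ⟨hv, hw⟩, hd⟩
      obtain ⟨h1, h2⟩ := mem_cells.mp hp
      exact ⟨p.1, p.2, h1, h2, hv, hw, hd⟩
    · rintro ⟨x, y, h1, h2, hv, hw, hd⟩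
      exact ⟨(x, y), mem_cells.mpr ⟨h1, h2⟩, ⟨hv, hw⟩, hd⟩
  · intro s p hp
    obtain ⟨h1, h2⟩ := mem_cells.mp hp
    show (let q := pvOrig (key.length : Int) t (p.1 : Int) (p.2 : Int)
      if pvGet key q.1 q.2 == 1 then
        let di := r0 - (p.1 : Int)
        let dj := c0 - (p.2 : Int)
        if -(L : Int) < di ∧ di < L ∧ -(L : Int) < dj ∧ dj < L then PySem.Set.add s (di, dj) else s
      else s) = _
    rw [show pvOrig (key.length : Int) t (p.1 : Int) (p.2 : Int)
      = (((oN key.length t (p.1, p.2)).1 : Int), ((oN key.length t (p.1, p.2)).2 : Int)) from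
        pvOrig_natCast key.length t p.1 p.2 h1 h2]
    simp only [pvGet_natCast, beq_iff_eq]
    by_cases hv : gN key (oN key.length t (p.1, p.2)).1 (oN key.length t (p.1, p.2)).2 = 1
    · by_cases hw : -(L : Int) < r0 - (p.1 : Int) ∧ r0 - (p.1 : Int) < L ∧
          -(L : Int) < c0 - (p.2 : Int) ∧ c0 - (p.2 : Int) < L
      · rw [if_pos hv, if_pos hw, if_pos ⟨hv, hw⟩]
      · rw [if_pos hv, if_neg hw, if_neg (by tauto)]
    · rw [if_neg hv, if_neg (by tauto)]

-- ---------- B's per-shift check agrees with the pointwise match ----------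

lemma bexpr_eq (key lock : List (List Int)) (hpre : ∀ row ∈ lock, lock.length ≤ row.length)
    (t : Nat) (d : Int × Int) (rN cN : Nat) (hr : rN < lock.length) (hc : cN < lock.length) :
    ((if 0 ≤ (rN : Int) - d.1 ∧ (rN : Int) - d.1 < (key.length : Int) ∧
        0 ≤ (cN : Int) - d.2 ∧ (cN : Int) - d.2 < (key.length : Int) then
        let p := pvOrig (key.length : Int) t ((rN : Int) - d.1) ((cN : Int) - d.2)
        pvGet key p.1 p.2
      else 0) == pvGet (ivG lock) (rN : Int) (cN : Int)) = true
    ↔ ((if 0 ≤ (rN : Int) - d.1 ∧ (rN : Int) - d.1 < (key.length : Int) ∧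
          0 ≤ (cN : Int) - d.2 ∧ (cN : Int) - d.2 < (key.length : Int)
        then gN key (oN key.length t (((rN : Int) - d.1).toNat, ((cN : Int) - d.2).toNat)).1
               (oN key.length t (((rN : Int) - d.1).toNat, ((cN : Int) - d.2).toNat)).2
        else 0) = (if gN lock rN cN = 0 then 1 else 0)) := by
  rw [beq_iff_eq, pvGet_natCast, gN_ivG lock hpre rN cN hr hc]
  have hbr : (if 0 ≤ (rN : Int) - d.1 ∧ (rN : Int) - d.1 < (key.length : Int) ∧
        0 ≤ (cN : Int) - d.2 ∧ (cN : Int) - d.2 < (key.length : Int) then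
        let p := pvOrig (key.length : Int) t ((rN : Int) - d.1) ((cN : Int) - d.2)
        pvGet key p.1 p.2
      else 0)
      = (if 0 ≤ (rN : Int) - d.1 ∧ (rN : Int) - d.1 < (key.length : Int) ∧
          0 ≤ (cN : Int) - d.2 ∧ (cN : Int) - d.2 < (key.length : Int)
        then gN key (oN key.length t (((rN : Int) - d.1).toNat, ((cN : Int) - d.2).toNat)).1
               (oN key.length t (((rN : Int) - d.1).toNat, ((cN : Int) - d.2).toNat)).2
        else 0) := by
    split_ifs with h
    · show pvGet key (pvOrig (key.length : Int) t ((rN : Int) - d.1) ((cN : Int) - d.2)).1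
        (pvOrig (key.length : Int) t ((rN : Int) - d.1) ((cN : Int) - d.2)).2 = _
      obtain ⟨h1, h2, h3, h4⟩ := h
      obtain ⟨a, ha⟩ := Int.eq_ofNat_of_zero_le h1
      obtain ⟨b, hb⟩ := Int.eq_ofNat_of_zero_le h3
      rw [ha, hb, pvOrig_natCast key.length t a b (by omega) (by omega)]
      simp
    · rfl
  rw [hbr]

lemma bckT_iff (key lock : List (List Int)) (hpre : ∀ row ∈ lock, lock.length ≤ row.length)
    (t : Nat) (d : Int × Int) :
    bckT key lock t d = true ↔ PtM key lock t d.1 d.2 := by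
  unfold bckT PtM
  rw [ivB_eq]
  simp only [List.all_eq_true, PySem.List.mem_pyRange_one]
  constructor
  · intro h r hr c hc
    have h2 := h (r : Int) ⟨by omega, by omega⟩ (c : Int) ⟨by omega, by omega⟩
    have h3 := (bexpr_eq key lock hpre t d r c hr hc).mp h2
    simpa using h3
  · intro h r hr c hc
    have h2 := h r.toNat (by omega) c.toNat (by omega)
    have h3 : ((r.toNat : Int)) = r := by omega
    have h4 : ((c.toNat : Int)) = c := by omega
    have h5 := (bexpr_eq key lock hpre t d r.toNat c.toNat (by omega) (by omega)).mpr h2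
    rw [h3, h4] at h5
    exact h5

-- ---------- the heart: per rotation, A's exhaustive search = B's candidate search ----------

lemma per_t (key lock : List (List Int)) (hpre : ∀ row ∈ lock, lock.length ≤ row.length)
    (hrows : ∀ r < lock.length, rlen lock r = lock.length)
    (r0 c0 : Int) (hr0 : 0 ≤ r0) (hrL : r0 < lock.length) (hc0 : 0 ≤ c0) (hcL : c0 < lock.length)
    (hz : gN lock r0.toNat c0.toNat = 0) (t : Nat) :
    findA (rotIter t key) (ivG lock)
      = (candT key (lock.length : Int) r0 c0 t).any (fun d => bckT key lock t d) := by
  apply Bool.coe_iff_coe.mp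
  rw [findA_iff]
  simp only [length_ivG]
  rw [List.any_eq_true]
  constructor
  · rintro ⟨di, dj, hwin, heq⟩
    have hm : PtM key lock t di dj := (moveA_iff key lock hpre hrows t di dj).mp heq
    have hcell := hm r0.toNat (by omega) c0.toNat (by omega)
    rw [if_pos hz] at hcell
    by_cases hcond : 0 ≤ ((r0.toNat : Nat) : Int) - di ∧ ((r0.toNat : Nat) : Int) - di < (key.length : Int) ∧
        0 ≤ ((c0.toNat : Nat) : Int) - dj ∧ ((c0.toNat : Nat) : Int) - dj < (key.length : Int)
    · rw [if_pos hcond] at hcell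
      refine ⟨(di, dj), ?_, ?_⟩
      · rw [candT_mem]
        refine ⟨(((r0.toNat : Nat) : Int) - di).toNat, (((c0.toNat : Nat) : Int) - dj).toNat,
          by omega, by omega, hcell, ?_, ?_⟩
        · obtain ⟨w1, w2, w3, w4⟩ := hwin
          refine ⟨by omega, by omega, by omega, by omega⟩
        · refine Prod.ext ?_ ?_ <;> · show _ = _; omega
      · rw [bckT_iff key lock hpre t (di, dj)]
        exact hm
    · rw [if_neg hcond] at hcell
      exact absurd hcell (by norm_num)
  · rintro ⟨d, hd, hb⟩
    obtain ⟨x, y, hx, hy, hv, hw, hde⟩ := (candT_mem key lock.length r0 c0 t d).mp hd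
    obtain rfl : d = (r0 - (x : Int), c0 - (y : Int)) := hde
    have hm := (bckT_iff key lock hpre t _).mp hb
    exact ⟨r0 - (x : Int), c0 - (y : Int), hw, (moveA_iff key lock hpre hrows t _ _).mpr hm⟩

lemma sol_eq (key lock : List (List Int)) :
    solution key lock =
      (if (if ∃ p ∈ cells lock.length lock.length, gN lock p.1 p.2 = 0 then (1 : Int) else 0) == 0 then true
       else if findA key (ivG lock) then true
       else if findA (rotate_90 key) (ivG lock) then true
       else if findA (rotate_90 (rotate_90 key)) (ivG lock) then true
       else if findA (rotate_90 (rotate_90 (rotate_90 key))) (ivG lock) then true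
       else false) := by
  unfold solution
  rw [A_invert key lock]

-- ===== VERDICT (by name: the statement is the Claim_ definition above) =====
theorem solution_spec : Claim_equal_solution := by
  unfold Claim_equal_solution
  intro key lock _ hpre
  unfold Spec_solution
  obtain ⟨hsq, _⟩ := hpre
  have hpreL : ∀ row ∈ lock, lock.length ≤ row.length := fun row hrow => (hsq row hrow).ge
  have hrows : ∀ r < lock.length, rlen lock r = lock.length := by
    intro r hr
    unfold rlen
    rw [List.getD_eq_getElem _ _ hr]
    exact hsq _ (List.getElem_mem hr)
  rw [sol_eq, alt_eq]
  by_cases hz : ∃ p ∈ cells lock.length lock.length, gN lock p.1 p.2 = 0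
  · rw [if_pos hz]
    have hone : ((1 : Int) == 0) = false := rfl
    rw [hone]
    simp only [Bool.false_eq_true, if_false]
    cases hones : onesT key lock with
    | nil =>
      exfalso
      obtain ⟨p, hp, hv⟩ := hz
      exact (onesT_nil_iff key lock hpreL).mp hones p hp hv
    | cons hd tl =>
      rcases hd with ⟨r0, c0⟩
      obtain ⟨h1, h2, h3, h4, h5⟩ := onesT_head key lock hpreL r0 c0 tl hones
      have ht0 := per_t key lock hpreL hrows r0 c0 h1 h2 h3 h4 h5 0
      rw [rotIter_zero] at ht0
      have ht1 := per_t key lock hpreL hrows r0 c0 h1 h2 h3 h4 h5 1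
      rw [rotIter_succ, rotIter_zero] at ht1
      have ht2 := per_t key lock hpreL hrows r0 c0 h1 h2 h3 h4 h5 2
      rw [rotIter_succ, rotIter_succ, rotIter_zero] at ht2
      have ht3 := per_t key lock hpreL hrows r0 c0 h1 h2 h3 h4 h5 3
      rw [rotIter_succ, rotIter_succ, rotIter_succ, rotIter_zero] at ht3
      rw [ht0, ht1, ht2, ht3]
      rw [show List.range 4 = [0, 1, 2, 3] from rfl]
      simp only [List.any_cons, List.any_nil]
      split_ifs with a1 a2 a3 a4 <;> simp_all
  · rw [if_neg hz]
    have hone : ((0 : Int) == 0) = true := rfl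
    rw [hone]
    have ho : onesT key lock = [] :=
      (onesT_nil_iff key lock hpreL).mpr (fun p hp hv => hz ⟨p, hp, hv⟩)
    rw [ho]
    simp
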